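-- pv_equiv track=rewrite | github.com/saloaaro/TIRA1 | packbox.py | solve
-- ===== SOURCE A (Python) =====
-- def solve(t, x):
--     t.sort()
--
--     count = 0
--     total_weight = 0
--
--     for weight in t:
--         if total_weight + weight <= x:
--             total_weight += weight
--             count += 1
--         else:
--             break
--
--     return count
-- ===== SOURCE B (Python) =====
-- def solve(t, x):
--     t.sort()  # keep A's in-place mutation of the argument
--     ps = []
--     s = 0
--     for w in t:
--         s += w
--         ps.append(s)
--     return next((i for i, p in enumerate(ps) if p > x), len(ps))
-- ===== Notes on version B (the rewrite author's own statement) =====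
-- stated objective: alternative
-- what changed: Instead of one loop carrying (count, running total) with an early break, B first materialises the full prefix-sum table of the sorted list and then returns the index of the first prefix sum exceeding x (defaulting to the length).
import Mathlib
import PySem

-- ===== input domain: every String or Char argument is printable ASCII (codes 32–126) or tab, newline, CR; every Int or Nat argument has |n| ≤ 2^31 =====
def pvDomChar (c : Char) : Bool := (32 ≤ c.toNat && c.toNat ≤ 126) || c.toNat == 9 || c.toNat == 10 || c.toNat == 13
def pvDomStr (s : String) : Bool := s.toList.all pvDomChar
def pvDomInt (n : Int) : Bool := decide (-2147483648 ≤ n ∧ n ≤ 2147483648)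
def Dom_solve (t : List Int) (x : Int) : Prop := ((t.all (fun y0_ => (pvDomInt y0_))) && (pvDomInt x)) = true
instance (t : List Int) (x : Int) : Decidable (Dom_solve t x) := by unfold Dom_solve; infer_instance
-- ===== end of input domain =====

-- B builds the full prefix-sum table of the sorted list and returns the index of the first
-- entry exceeding x, instead of A's single accumulator loop with an early break; same return
-- value everywhere. Both sort t in place in Python (return value proved here).

-- ===== PORT A =====
-- A's for-loop with break: state (count, total_weight), recursion over the sorted list
def solveLoop (x : Int) : List Int → Int → Int → Int
  | [], count, _ => count
  | w :: ws, count, total =>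
      if total + w ≤ x then solveLoop x ws (count + 1) (total + w) else count

def solve (t : List Int) (x : Int) : Int :=
  solveLoop x (PySem.List.sorted t (fun y => y) false) 0 0

-- ===== PORT B =====
-- B's prefix-sum table: running sum s, appending each partial sum
def solvePs (s : Int) : List Int → List Int
  | [] => []
  | w :: ws => (s + w) :: solvePs (s + w) ws

-- B's `next((i for i, p in enumerate(ps) if p > x), len(ps))`: first index with p > x, else length
def solveFirstGt (x : Int) : List Int → Int → Int
  | [], i => i
  | p :: ps, i => if p > x then i else solveFirstGt x ps (i + 1)

def solve_alt (t : List Int) (x : Int) : Int :=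
  solveFirstGt x (solvePs 0 (PySem.List.sorted t (fun y => y) false)) 0

-- ===== PRECONDITION & SPEC =====
def Spec_solve (t : List Int) (x : Int) (out : Int) : Prop := out = solve_alt t x
instance (t : List Int) (x : Int) (out : Int) : Decidable (Spec_solve t x out) := by unfold Spec_solve; infer_instance

-- ===== CLAIM (what is proved, stated in full; the proofs are below) =====
def Claim_equal_solve : Prop := ∀ (t : List Int) (x : Int), Dom_solve t x → Spec_solve t x (solve t x)

-- ===== LEMMAS AND PROOFS =====
theorem solveLoop_eq_firstGt (x : Int) (ws : List Int) :
    ∀ (count total : Int), solveLoop x ws count total = solveFirstGt x (solvePs total ws) count := by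
  induction ws with
  | nil => intro count total; simp [solveLoop, solvePs, solveFirstGt]
  | cons w ws ih =>
      intro count total
      simp only [solveLoop, solvePs, solveFirstGt]
      by_cases h : total + w ≤ x
      · rw [if_pos h, if_neg (by omega), ih]
      · rw [if_neg h, if_pos (by omega)]

-- ===== VERDICT (by name: the statement is the Claim_ definition above) =====
theorem solve_spec : Claim_equal_solve := by
  intro t x _
  unfold Spec_solve solve solve_alt
  rw [solveLoop_eq_firstGt]
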